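-- pv_equiv track=rewrite | github.com/buildspacex-cell/sakhi | sakhi/apps/api/services/meta_reflection/triggers.py | detect_meta_reflection_intents
-- ===== SOURCE A (Python) =====
-- from typing import Any, Dict, List
--
-- _META_KEYWORDS = {
--     "why",
--     "meaning",
--     "purpose",
--     "clarity",
--     "identity",
--     "values",
--     "lost",
--     "confused",
--     "self",
--     "introspect",
--     "reflection",
-- }
--
-- def detect_meta_reflection_intents(intents: List[Dict[str, Any]]) -> List[Dict[str, Any]]:
--     """Return intents that look introspective / meta reflection friendly."""
--
--     hits: List[Dict[str, Any]] = []
--     for intent in intents or []: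
--         title = (intent.get("title") or "").lower()
--         raw = (intent.get("raw_input") or "").lower()
--         if any(keyword in title for keyword in _META_KEYWORDS) or any(
--             keyword in raw for keyword in _META_KEYWORDS
--         ):
--             hits.append(intent)
--     return hits
-- ===== SOURCE B (Python) =====
-- from typing import Any, Dict, List
--
-- _KW_LIST = (
--     "why", "meaning", "purpose", "clarity", "identity", "values",
--     "lost", "confused", "self", "introspect", "reflection",
-- )
--
--
-- def _has_meta(text) -> bool:
--     """Single left-to-right scan: at each position check whether some keyword starts there."""
--     t = (text or "").lower()
--     return any(t.startswith(k, i) for i in range(len(t)) for k in _KW_LIST)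
--
--
-- def detect_meta_reflection_intents(intents: List[Dict[str, Any]]) -> List[Dict[str, Any]]:
--     return [intent for intent in (intents or [])
--             if _has_meta(intent.get("title")) or _has_meta(intent.get("raw_input"))]
-- ===== Notes on version B (the rewrite author's own statement) =====
-- stated objective: alternative
-- what changed: Replaces the per-keyword substring-search loops over the whole text with a filter driven by a single left-to-right scan of each lowercased text that checks at every position whether some keyword starts there (startswith at offset), instead of running a separate 'keyword in text' search for each of the 11 keywords.
import Mathlib
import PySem

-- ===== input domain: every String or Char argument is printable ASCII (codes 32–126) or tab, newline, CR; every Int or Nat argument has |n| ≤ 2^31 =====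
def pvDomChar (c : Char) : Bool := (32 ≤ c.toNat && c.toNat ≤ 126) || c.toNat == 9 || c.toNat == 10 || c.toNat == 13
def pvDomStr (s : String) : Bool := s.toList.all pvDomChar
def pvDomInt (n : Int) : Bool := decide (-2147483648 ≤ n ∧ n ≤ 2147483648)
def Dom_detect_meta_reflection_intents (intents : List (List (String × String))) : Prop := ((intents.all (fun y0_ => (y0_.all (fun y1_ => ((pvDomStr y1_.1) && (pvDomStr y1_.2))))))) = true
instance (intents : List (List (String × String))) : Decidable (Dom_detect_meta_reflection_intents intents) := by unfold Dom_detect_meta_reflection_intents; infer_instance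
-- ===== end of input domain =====

-- B replaces A's per-keyword 'keyword in text' searches by a filter driven by one left-to-right
-- scan of each lowercased text testing at every position whether some keyword starts there
-- (objective: alternative algorithm, same asymptotic cost).


-- ===== PORT A =====
-- _META_KEYWORDS = {...} : a Python set literal (all elements distinct)
def metaKeywordsA : PySem.Set String := PySem.Set.ofList
  ["why", "meaning", "purpose", "clarity", "identity", "values",
   "lost", "confused", "self", "introspect", "reflection"]

def detect_meta_reflection_intents (intents : List (List (String × String))) : List (List (String × String)) :=
  intents.foldl (fun hits intent =>
    let title := PySem.Str.lower (((PySem.Dict.mk intent).get? "title").getD "")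
    let raw := PySem.Str.lower (((PySem.Dict.mk intent).get? "raw_input").getD "")
    if metaKeywordsA.any (fun keyword => PySem.Str.isIn keyword title)
       || metaKeywordsA.any (fun keyword => PySem.Str.isIn keyword raw) then
      hits ++ [intent]
    else hits) []

-- ===== PORT B =====
def kwListB : List String :=
  ["why", "meaning", "purpose", "clarity", "identity", "values",
   "lost", "confused", "self", "introspect", "reflection"]

-- any(t.startswith(k, i) for i in range(len(t)) for k in _KW_LIST): recursion over positions
def scanHasMeta : List Char → Bool
  | [] => false
  | c :: rest => kwListB.any (fun k => PySem.Chars.startswith (c :: rest) k.toList) || scanHasMeta rest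

-- _has_meta(text): t = (text or "").lower(), then the position scan
def hasMetaB (text : Option String) : Bool :=
  scanHasMeta (PySem.Str.lower (text.getD "")).toList

def detect_meta_reflection_intents_alt (intents : List (List (String × String))) : List (List (String × String)) :=
  intents.filter (fun intent =>
    hasMetaB ((PySem.Dict.mk intent).get? "title") || hasMetaB ((PySem.Dict.mk intent).get? "raw_input"))

-- ===== PRECONDITION & SPEC =====
def Spec_detect_meta_reflection_intents (intents : List (List (String × String))) (out : List (List (String × String))) : Prop := out = detect_meta_reflection_intents_alt intents
instance (intents : List (List (String × String))) (out : List (List (String × String))) : Decidable (Spec_detect_meta_reflection_intents intents out) := by unfold Spec_detect_meta_reflection_intents; infer_instance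

-- ===== CLAIM (what is proved, stated in full; the proofs are below) =====
def Claim_equal_detect_meta_reflection_intents : Prop := ∀ (intents : List (List (String × String))), Dom_detect_meta_reflection_intents intents → Spec_detect_meta_reflection_intents intents (detect_meta_reflection_intents intents)

-- ===== LEMMAS AND PROOFS =====

-- the position scan finds a keyword iff some keyword is a substring
theorem scanHasMeta_eq_any_isIn (s : List Char) :
    scanHasMeta s = kwListB.any (fun k => PySem.Chars.isIn k.toList s) := by
  induction s with
  | nil => decide
  | cons c rest ih =>
    rw [scanHasMeta, ih]
    apply Bool.eq_iff_iff.mpr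
    simp only [Bool.or_eq_true, List.any_eq_true, PySem.Chars.startswith_iff,
      PySem.Chars.isIn_iff_infix, List.infix_cons_iff]
    constructor
    · rintro (⟨k, hk, h⟩ | ⟨k, hk, h⟩)
      · exact ⟨k, hk, Or.inl h⟩
      · exact ⟨k, hk, Or.inr h⟩
    · rintro ⟨k, hk, h | h⟩
      · exact Or.inl ⟨k, hk, h⟩
      · exact Or.inr ⟨k, hk, h⟩

theorem hasMetaB_eq (v : Option String) :
    hasMetaB v = metaKeywordsA.any (fun keyword => PySem.Str.isIn keyword (PySem.Str.lower (v.getD ""))) := by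
  have hset : (metaKeywordsA : List String) = kwListB := by decide
  rw [hasMetaB, scanHasMeta_eq_any_isIn, hset]
  apply congrArg
  funext k
  simp [PySem.Str.isIn]

-- ===== VERDICT (by name: the statement is the Claim_ definition above) =====
theorem detect_meta_reflection_intents_spec : Claim_equal_detect_meta_reflection_intents := by
  intro intents _
  unfold Spec_detect_meta_reflection_intents detect_meta_reflection_intents detect_meta_reflection_intents_alt
  rw [PySem.List.foldl_append_if_eq_filter]
  simp only [List.nil_append]
  apply List.filter_congr
  intro intent _
  simp only [hasMetaB_eq]
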